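-- pv_equiv track=rewrite | github.com/sapanda/lumian | synthesis_core/app/utils.py | split_indexed_transcript_lines_into_chunks
-- ===== SOURCE A (Python) =====
-- CHUNK_MIN_WORDS = 500
--
-- def split_indexed_transcript_lines_into_chunks(
--     text: str, interviewee: str
-- ) -> list[list[str]]:
--     """Split indexed lines into chunks. No chunk (except the first) should
--     start with 'interviewee' name"""
--     results, cur_results, lines, chunk_size = [], [], text.split("\n"), 0
--     n = len(lines)
--     for i in range(n):
--         line = lines[i]
--         cur_results.append(line)
--         words = line.split()
--         chunk_size += len(words)
--         if i == n - 1 or (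
--             chunk_size > CHUNK_MIN_WORDS
--             and (lines[i + 1].split(" ", 1))[1].startswith(interviewee)
--         ):
--             results.append(cur_results)
--             cur_results, chunk_size = [], 0
--     return results
-- ===== SOURCE B (Python) =====
-- CHUNK_MIN_WORDS = 500
--
--
-- def split_indexed_transcript_lines_into_chunks(
--     text: str, interviewee: str
-- ) -> list[list[str]]:
--     """Split indexed lines into chunks. No chunk (except the first) should
--     start with 'interviewee' name"""
--     return _chunks(text.split("\n"), interviewee)
--
--
-- def _first_cut(lines: list[str], interviewee: str) -> int:
--     """Index where the first chunk of 'lines' ends (len(lines) if it never ends)."""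
--     total = 0
--     for j in range(len(lines)):
--         total += len(lines[j].split())
--         if j + 1 < len(lines) and total > CHUNK_MIN_WORDS \
--                 and lines[j + 1].split(" ", 1)[1].startswith(interviewee):
--             return j + 1
--     return len(lines)
--
--
-- def _chunks(lines: list[str], interviewee: str) -> list[list[str]]:
--     """Peel off the first chunk, recurse on the remaining lines."""
--     cut = _first_cut(lines, interviewee)
--     if cut == len(lines):
--         return [lines]
--     return [lines[:cut]] + _chunks(lines[cut:], interviewee)
-- ===== Notes on version B (the rewrite author's own statement) =====
-- stated objective: alternative
-- what changed: Replaces A's single accumulator loop (results/cur_results/chunk_size mutated per line) by a recursive peel-off decomposition: a helper scans for the index where the first chunk ends, the chunk is taken as a slice lines[:cut], and the function recurses on lines[cut:]; no chunk list or results list is accumulated during the scan.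
import Mathlib
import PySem

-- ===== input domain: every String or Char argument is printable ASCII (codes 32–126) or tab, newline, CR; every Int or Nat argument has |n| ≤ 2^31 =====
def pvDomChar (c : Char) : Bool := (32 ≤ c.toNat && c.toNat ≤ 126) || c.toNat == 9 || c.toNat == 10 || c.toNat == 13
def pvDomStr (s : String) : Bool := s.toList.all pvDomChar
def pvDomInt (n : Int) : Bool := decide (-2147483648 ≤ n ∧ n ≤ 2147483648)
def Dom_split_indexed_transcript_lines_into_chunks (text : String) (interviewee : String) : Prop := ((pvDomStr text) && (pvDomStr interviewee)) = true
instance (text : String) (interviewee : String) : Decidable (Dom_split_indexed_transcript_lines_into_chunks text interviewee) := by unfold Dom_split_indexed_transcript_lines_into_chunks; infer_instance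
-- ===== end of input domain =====

-- B replaces A's accumulator loop by a recursive peel-off decomposition: find the
-- index where the first chunk ends, slice it off, recurse on the rest (objective:
-- alternative, same cost).

-- word count of a line: len(line.split())
def pvWords (line : String) : Int := ((PySem.Str.split₀ line).length : Int)

-- line.split(" ", 1)[1]  (none = Python IndexError: no space in the line; outside Pre_)
def pvRest? (line : String) : Option String :=
  match PySem.Str.splitMax? line " " 1 with
  | some parts => PySem.List.pyGet? parts 1
  | none => none

-- (line.split(" ", 1))[1].startswith(interviewee); false stands for the IndexError
-- case, which Pre_ excludes
def pvBoundary (interviewee : String) (line : String) : Bool :=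
  match pvRest? line with
  | some rest => PySem.Str.startswith rest interviewee
  | none => false

-- ===== PORT A =====
-- A's for-i-in-range(n) loop with lines[i+1] lookahead, as structural recursion on the
-- remaining lines (rest.head? is lines[i+1]; rest = [] is the i == n-1 branch)
def pvGoA (interviewee : String) : List String → List String → Int → List (List String)
  | [], _, _ => []
  | line :: rest, cur_results, chunk_size =>
    let cur_results := cur_results ++ [line]
    let chunk_size := chunk_size + pvWords line
    match rest with
    | [] => [cur_results]
    | next :: _ =>
      if chunk_size > 500 ∧ pvBoundary interviewee next = true then
        cur_results :: pvGoA interviewee rest [] 0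
      else
        pvGoA interviewee rest cur_results chunk_size

def split_indexed_transcript_lines_into_chunks (text : String) (interviewee : String) : List (List String) :=
  pvGoA interviewee ((PySem.Str.split? text "\n").getD []) [] 0

-- ===== PORT B =====
-- B's _first_cut: the for-j loop carrying 'total', as recursion on the list (the
-- j+1 < n test is the cons-cons pattern); returns the length of the first chunk
def pvFirstCut (interviewee : String) : List String → Int → Nat
  | [], _ => 0
  | [_], _ => 1
  | l :: next :: rest, total =>
    let total := total + pvWords l
    if total > 500 ∧ pvBoundary interviewee next = true then 1
    else 1 + pvFirstCut interviewee (next :: rest) total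

-- pvFirstCut consumes at least one line of a non-empty list (termination of pvChunks)
lemma pvFirstCut_pos (iv : String) (lines : List String) (t : Int) (h : lines ≠ []) :
    1 ≤ pvFirstCut iv lines t := by
  match lines with
  | [] => exact absurd rfl h
  | [_] => simp [pvFirstCut]
  | l :: next :: rest =>
    rw [pvFirstCut]
    split_ifs <;> omega

-- B's _chunks: peel off the first chunk lines[:cut], recurse on lines[cut:]
def pvChunks (interviewee : String) (lines : List String) : List (List String) :=
  let cut := pvFirstCut interviewee lines 0
  if cut = lines.length then [lines]
  else lines.take cut :: pvChunks interviewee (lines.drop cut)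
termination_by lines.length
decreasing_by
  rename_i h
  have hne : lines ≠ [] := by
    intro he; subst he; exact h rfl
  have := pvFirstCut_pos interviewee lines 0 hne
  have : 0 < lines.length := List.length_pos_iff.mpr hne
  simp only [List.length_drop]
  omega

def split_indexed_transcript_lines_into_chunks_alt (text : String) (interviewee : String) : List (List String) :=
  pvChunks interviewee ((PySem.Str.split? text "\n").getD [])

-- ===== PRECONDITION & SPEC =====
-- A (and B) raise IndexError when a line tested for a chunk boundary contains no space
-- (line.split(' ',1)[1]). Pre_ excludes, slightly more than necessary, every text with
-- more than CHUNK_MIN_WORDS (=500) words in which some non-first line contains no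
-- space: only such texts can reach the failing subscript (the test is short-circuited
-- while the running count is ≤ 500, and the first line is never tested).
def Pre_split_indexed_transcript_lines_into_chunks (text : String) (interviewee : String) : Prop :=
  (∀ l ∈ ((PySem.Str.split? text "\n").getD []).drop 1, PySem.Str.isIn " " l = true)
  ∨ (((PySem.Str.split? text "\n").getD []).map (fun l => (PySem.Str.split₀ l).length)).sum ≤ 500
instance (text : String) (interviewee : String) : Decidable (Pre_split_indexed_transcript_lines_into_chunks text interviewee) := by unfold Pre_split_indexed_transcript_lines_into_chunks; infer_instance

def pvWitness_split_indexed_transcript_lines_into_chunks : String × String :=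
  ("1 Bob: hello there\n2 Alice: hi", "Bob:")

def Spec_split_indexed_transcript_lines_into_chunks (text : String) (interviewee : String) (out : List (List String)) : Prop := out = split_indexed_transcript_lines_into_chunks_alt text interviewee
instance (text : String) (interviewee : String) (out : List (List String)) : Decidable (Spec_split_indexed_transcript_lines_into_chunks text interviewee out) := by unfold Spec_split_indexed_transcript_lines_into_chunks; infer_instance

-- ===== CLAIM (what is proved, stated in full; the proofs are below) =====
def Claim_equal_split_indexed_transcript_lines_into_chunks : Prop := ∀ (text : String) (interviewee : String), Dom_split_indexed_transcript_lines_into_chunks text interviewee → Pre_split_indexed_transcript_lines_into_chunks text interviewee → Spec_split_indexed_transcript_lines_into_chunks text interviewee (split_indexed_transcript_lines_into_chunks text interviewee)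

-- ===== LEMMAS AND PROOFS =====

-- splitOn never returns the empty list (so the lines list of both ports is a cons)
lemma pvSplitOnGo_ne_nil (sep : List Char) :
    ∀ (fuel : Nat) (l cur : List Char) (acc : List (List Char)),
      PySem.Chars.splitOn.go sep fuel l cur acc ≠ [] := by
  intro fuel
  induction fuel with
  | zero => intro l cur acc; simp [PySem.Chars.splitOn.go]
  | succ n ih =>
    intro l cur acc
    cases l with
    | nil => simp [PySem.Chars.splitOn.go]
    | cons c rest =>
      rw [PySem.Chars.splitOn.go]
      split_ifs with h
      · exact ih _ _ _
      · exact ih _ _ _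

lemma pvLines_ne_nil (text : String) :
    (PySem.Str.split? text "\n").getD [] ≠ [] := by
  intro h
  rw [PySem.Str.split?, PySem.Chars.split?] at h
  rw [if_neg (by decide : ¬ (("\n".toList).isEmpty = true))] at h
  simp only [Option.map_some, Option.getD_some, List.map_eq_nil_iff] at h
  rw [PySem.Chars.splitOn] at h
  exact pvSplitOnGo_ne_nil _ _ _ _ _ h

-- pvFirstCut never exceeds the number of lines
lemma pvFirstCut_le (iv : String) :
    ∀ (lines : List String) (t : Int), pvFirstCut iv lines t ≤ lines.length := by
  intro lines
  induction lines with
  | nil => intro t; simp [pvFirstCut]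
  | cons l rest ih =>
    intro t
    cases rest with
    | nil => simp [pvFirstCut]
    | cons next r2 =>
      rw [pvFirstCut]
      split_ifs with h
      · simp
      · have := ih (t + pvWords l)
        simp only [List.length_cons] at *
        omega

-- A's run from any state equals: find the first cut (from the carried size), emit
-- the pending chunk extended by the prefix, restart with a fresh accumulator.
lemma pvGoA_firstCut (iv : String) :
    ∀ (lines : List String) (cur : List String) (size : Int), lines ≠ [] →
    pvGoA iv lines cur size =
      (if pvFirstCut iv lines size = lines.length then [cur ++ lines]
       else (cur ++ lines.take (pvFirstCut iv lines size)) ::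
              pvGoA iv (lines.drop (pvFirstCut iv lines size)) [] 0) := by
  intro lines
  induction lines with
  | nil => intro cur size h; exact absurd rfl h
  | cons l rest ih =>
    intro cur size _
    cases rest with
    | nil =>
      simp [pvGoA, pvFirstCut]
    | cons next r2 =>
      rw [pvGoA, pvFirstCut]
      by_cases hc : size + pvWords l > 500 ∧ pvBoundary iv next = true
      · rw [if_pos hc, if_pos hc]
        rw [if_neg (by simp)]
        simp
      · rw [if_neg hc, if_neg hc]
        have hrec := ih (cur ++ [l]) (size + pvWords l) (by simp)
        rw [hrec]
        have hle := pvFirstCut_le iv (next :: r2) (size + pvWords l)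
        by_cases he : pvFirstCut iv (next :: r2) (size + pvWords l) = (next :: r2).length
        · rw [if_pos he]
          rw [if_pos (by simp only [List.length_cons] at he ⊢; omega)]
          simp
        · rw [if_neg he]
          rw [if_neg (by simp only [List.length_cons] at he hle ⊢; omega)]
          have h1 : 1 ≤ pvFirstCut iv (next :: r2) (size + pvWords l) :=
            pvFirstCut_pos iv _ _ (by simp)
          obtain ⟨k, hk⟩ : ∃ k, pvFirstCut iv (next :: r2) (size + pvWords l) = k + 1 :=
            ⟨pvFirstCut iv (next :: r2) (size + pvWords l) - 1, by omega⟩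
          rw [hk, (by omega : 1 + (k + 1) = k + 1 + 1)]
          simp [List.take_succ_cons, List.drop_succ_cons]

-- A's run from the fresh state is B's recursion
lemma pvGoA_eq_chunks (iv : String) :
    ∀ (n : Nat) (lines : List String), lines.length ≤ n → lines ≠ [] →
    pvGoA iv lines [] 0 = pvChunks iv lines := by
  intro n
  induction n with
  | zero => intro lines h hne; cases lines with
      | nil => exact absurd rfl hne
      | cons a b => simp at h
  | succ m ih =>
    intro lines h hne
    rw [pvGoA_firstCut iv lines [] 0 hne, pvChunks]
    by_cases he : pvFirstCut iv lines 0 = lines.length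
    · rw [if_pos he, if_pos he]; simp
    · rw [if_neg he, if_neg he]
      have h1 := pvFirstCut_pos iv lines 0 hne
      have hle := pvFirstCut_le iv lines 0
      have hdrop : (lines.drop (pvFirstCut iv lines 0)) ≠ [] := by
        intro hd
        have := congrArg List.length hd
        simp only [List.length_drop, List.length_nil] at this
        omega
      rw [ih _ (by simp only [List.length_drop]; omega) hdrop]
      simp

-- ===== VERDICT (by name: the statement is the Claim_ definition above) =====
theorem split_indexed_transcript_lines_into_chunks_spec : Claim_equal_split_indexed_transcript_lines_into_chunks := by
  intro text iv _ _
  unfold Spec_split_indexed_transcript_lines_into_chunks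
  unfold split_indexed_transcript_lines_into_chunks split_indexed_transcript_lines_into_chunks_alt
  exact pvGoA_eq_chunks iv _ _ (le_refl _) (pvLines_ne_nil text)
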